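-- pv_equiv track=rewrite | github.com/shneydor/jeff-the-langgraph-chef | jeff/personality/tomato_integration.py | create_tomato_love_declaration
-- ===== SOURCE A (Python) =====
-- def create_tomato_love_declaration(intensity: int = 8) -> str:
--     """Create a passionate declaration of tomato love."""
--     declarations = {
--         5: "I have a deep appreciation for the noble tomato.",
--         6: "My heart holds a special place for the beautiful tomato.",
--         7: "I am deeply, madly in love with tomatoes in all their forms!",
--         8: "Tomatoes are my culinary soulmates, my kitchen companions, my edible poetry!",
--         9: "I am utterly, completely, passionately OBSESSED with the divine tomato!",
--         10: "TOMATOES ARE LIFE! TOMATOES ARE LOVE! TOMATOES ARE THE MEANING OF EXISTENCE!"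
--     }
--
--     # Get appropriate declaration for intensity level
--     for level in range(intensity, 4, -1):  # Work backwards to find appropriate level
--         if level in declarations:
--             return declarations[level]
--
--     return declarations[5]  # Default fallback
-- ===== SOURCE B (Python) =====
-- def create_tomato_love_declaration(intensity: int = 8) -> str:
--     """Create a passionate declaration of tomato love."""
--     declarations = {
--         5: "I have a deep appreciation for the noble tomato.",
--         6: "My heart holds a special place for the beautiful tomato.",
--         7: "I am deeply, madly in love with tomatoes in all their forms!",
--         8: "Tomatoes are my culinary soulmates, my kitchen companions, my edible poetry!",
--         9: "I am utterly, completely, passionately OBSESSED with the divine tomato!",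
--         10: "TOMATOES ARE LIFE! TOMATOES ARE LOVE! TOMATOES ARE THE MEANING OF EXISTENCE!"
--     }
--     level = max(5, min(10, intensity))
--     return declarations[level]
-- ===== Notes on version B (the rewrite author's own statement) =====
-- stated objective: simpler
-- what changed: A's backward search loop with its fallback branch is replaced by a single closed-form clamp level = max(5, min(10, intensity)) and one dict lookup.
import Mathlib
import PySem

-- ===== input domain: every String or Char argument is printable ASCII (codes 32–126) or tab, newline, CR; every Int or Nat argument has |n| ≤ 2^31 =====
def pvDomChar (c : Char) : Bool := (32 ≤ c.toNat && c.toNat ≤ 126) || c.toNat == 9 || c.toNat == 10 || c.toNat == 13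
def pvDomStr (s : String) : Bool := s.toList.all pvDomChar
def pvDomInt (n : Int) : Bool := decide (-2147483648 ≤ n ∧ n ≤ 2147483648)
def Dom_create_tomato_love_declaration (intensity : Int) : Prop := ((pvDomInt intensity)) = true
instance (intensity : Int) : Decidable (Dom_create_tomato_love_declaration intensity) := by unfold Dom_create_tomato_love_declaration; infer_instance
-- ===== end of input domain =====

-- B replaces A's backward countdown search loop by a single clamp
-- max(5, min(10, intensity)) and one dict lookup (simpler; O(1) instead of O(intensity) for large intensity).


-- ===== PORT A =====
-- the declarations dict (shared literal of both Pythons)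
def pvDecls : PySem.Dict Int String := PySem.Dict.ofList
  [ (5, "I have a deep appreciation for the noble tomato."),
    (6, "My heart holds a special place for the beautiful tomato."),
    (7, "I am deeply, madly in love with tomatoes in all their forms!"),
    (8, "Tomatoes are my culinary soulmates, my kitchen companions, my edible poetry!"),
    (9, "I am utterly, completely, passionately OBSESSED with the divine tomato!"),
    (10, "TOMATOES ARE LIFE! TOMATOES ARE LOVE! TOMATOES ARE THE MEANING OF EXISTENCE!") ]

-- A's loop 'for level in the countdown range: if level in declarations: return declarations[level]',
-- written as the structural countdown recursion the for-loop performs; the else branch is the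
-- fallback 'return declarations[5]' (key 5 is present in the literal dict, so the lookup cannot fail).
def pvALoop (level : Int) : String :=
  if _h : 4 < level then
    match pvDecls.get? level with
    | some s => s
    | none => pvALoop (level - 1)
  else
    match pvDecls.get? 5 with
    | some s => s
    | none => ""
termination_by (level - 4).toNat
decreasing_by omega

def create_tomato_love_declaration (intensity : Int) : String := pvALoop intensity

-- ===== PORT B =====
-- level = max(5, min(10, intensity)); return declarations[level] (the key is always present)
def create_tomato_love_declaration_alt (intensity : Int) : String :=
  (pvDecls.get? (max 5 (min 10 intensity))).getD ""

-- ===== PRECONDITION & SPEC =====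
def Spec_create_tomato_love_declaration (intensity : Int) (out : String) : Prop := out = create_tomato_love_declaration_alt intensity
instance (intensity : Int) (out : String) : Decidable (Spec_create_tomato_love_declaration intensity out) := by unfold Spec_create_tomato_love_declaration; infer_instance

-- ===== CLAIM (what is proved, stated in full; the proofs are below) =====
def Claim_equal_create_tomato_love_declaration : Prop := ∀ (intensity : Int), Dom_create_tomato_love_declaration intensity → Spec_create_tomato_love_declaration intensity (create_tomato_love_declaration intensity)

-- ===== LEMMAS AND PROOFS =====

-- keys of the literal dict are 5..10, so any level ≥ 11 misses
lemma pvDecls_eq_mk : pvDecls = PySem.Dict.mk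
  [ (5, "I have a deep appreciation for the noble tomato."),
    (6, "My heart holds a special place for the beautiful tomato."),
    (7, "I am deeply, madly in love with tomatoes in all their forms!"),
    (8, "Tomatoes are my culinary soulmates, my kitchen companions, my edible poetry!"),
    (9, "I am utterly, completely, passionately OBSESSED with the divine tomato!"),
    (10, "TOMATOES ARE LIFE! TOMATOES ARE LOVE! TOMATOES ARE THE MEANING OF EXISTENCE!") ] := by decide

lemma pvDecls_get?_high (n : Int) (h : 11 ≤ n) : pvDecls.get? n = none := by
  rw [pvDecls_eq_mk]
  simp only [PySem.Dict.get?_mk_cons, beq_iff_eq]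
  split_ifs <;> first | omega | rfl

-- for level ≥ 10 the loop walks down to 10 and stops there
lemma pvALoop_high (k : Nat) : ∀ n : Int, n = 10 + k → pvALoop n = pvALoop 10 := by
  induction k with
  | zero => intro n hn; subst hn; norm_num
  | succ m ih =>
    intro n hn
    rw [pvALoop]
    have h4 : 4 < n := by omega
    have hnone : pvDecls.get? n = none := pvDecls_get?_high n (by omega)
    simp only [h4, dif_pos, hnone]
    exact ih (n - 1) (by omega)

-- ===== VERDICT (by name: the statement is the Claim_ definition above) =====
theorem create_tomato_love_declaration_spec : Claim_equal_create_tomato_love_declaration := by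
  intro intensity _
  unfold Spec_create_tomato_love_declaration create_tomato_love_declaration create_tomato_love_declaration_alt
  by_cases hlo : intensity ≤ 4
  · rw [pvALoop]
    have : ¬ (4 < intensity) := by omega
    simp only [this, dif_neg, not_false_iff]
    have hm : max 5 (min 10 intensity) = 5 := by omega
    rw [hm]; rfl
  · by_cases hhi : intensity ≤ 10
    · interval_cases intensity <;> (rw [pvALoop]; rfl)
    · have hk : intensity = 10 + ((intensity - 10).toNat : Int) := by omega
      rw [pvALoop_high (intensity - 10).toNat intensity hk]
      have hm : max 5 (min 10 intensity) = 10 := by omega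
      rw [hm, pvALoop]; rfl
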